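-- pv_equiv track=rewrite | github.com/paradox-analytics/universal-scraper | universal_scraper/core/pattern_detector.py | _smart_sample
-- ===== SOURCE A (Python) =====
-- def _smart_sample(html: str, sample_size: int = 12000) -> str:
--     """
--     Smart HTML sampling - find actual content, not headers
--     Uses same logic as AI generator
--     """
--     content_markers = [
--         '<shreddit-post',  # Reddit
--         '<article',        # Articles
--         'class="post',     # Generic posts
--         'class="product',  # Products
--         'class="item',     # List items
--         'data-testid="post',
--         '<main',           # Main content
--     ]
--
--     # Find earliest content marker
--     earliest_pos = len(html)
--     for marker in content_markers:
--         pos = html.lower().find(marker.lower())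
--         if pos != -1 and pos < earliest_pos:
--             earliest_pos = pos
--
--     # Sample from content area with some context before
--     if earliest_pos < len(html):
--         start_pos = max(0, earliest_pos - 500)
--         return html[start_pos:start_pos + sample_size]
--     else:
--         # Fallback: first sample_size chars
--         return html[:sample_size]
-- ===== SOURCE B (Python) =====
-- def _smart_sample(html: str, sample_size: int = 12000) -> str:
--     """Single left-to-right scan: stop at the first position where any marker starts."""
--     markers = (
--         '<shreddit-post',
--         '<article',
--         'class="post',
--         'class="product',
--         'class="item',
--         'data-testid="post',
--         '<main',
--     )
--     low = html.lower()
--     earliest = None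
--     for i in range(len(low)):
--         if any(low.startswith(m, i) for m in markers):
--             earliest = i
--             break
--     if earliest is None:
--         return html[:sample_size]
--     start = max(0, earliest - 500)
--     return html[start:start + sample_size]
-- ===== Notes on version B (the rewrite author's own statement) =====
-- stated objective: alternative
-- what changed: Replaces seven separate full-string lower().find() scans combined by a running minimum with a single left-to-right scan over the lowercased string that stops at the first position where any of the 7 markers starts.
import Mathlib
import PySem

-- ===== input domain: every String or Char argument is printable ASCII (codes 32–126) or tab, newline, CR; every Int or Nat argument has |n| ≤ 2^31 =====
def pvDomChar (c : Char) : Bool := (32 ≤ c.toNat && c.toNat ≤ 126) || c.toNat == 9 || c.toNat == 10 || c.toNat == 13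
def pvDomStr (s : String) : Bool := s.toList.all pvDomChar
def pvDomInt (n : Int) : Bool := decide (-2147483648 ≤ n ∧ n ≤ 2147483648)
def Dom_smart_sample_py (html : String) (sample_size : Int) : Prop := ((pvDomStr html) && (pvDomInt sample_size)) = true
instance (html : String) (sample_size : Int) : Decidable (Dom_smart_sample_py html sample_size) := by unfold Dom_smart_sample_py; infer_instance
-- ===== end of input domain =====

-- B replaces the seven full-string .find scans and the running minimum by one left-to-right
-- scan that stops at the first position where any marker starts (objective: alternative).

-- ===== PORT A =====
def pvMarkersA : List String :=
  ["<shreddit-post", "<article", "class=\"post", "class=\"product", "class=\"item",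
   "data-testid=\"post", "<main"]

def smart_sample_py (html : String) (sample_size : Int) : String :=
  let earliest_pos : Int :=
    pvMarkersA.foldl (fun earliest marker =>
      let pos := PySem.Str.find (PySem.Str.lower html) (PySem.Str.lower marker)
      if pos ≠ -1 ∧ pos < earliest then pos else earliest) (PySem.Str.len html)
  if earliest_pos < PySem.Str.len html then
    let start_pos : Int := max 0 (earliest_pos - 500)
    PySem.Str.slice html (some start_pos) (some (start_pos + sample_size))
  else
    PySem.Str.slice html none (some sample_size)

-- ===== PORT B =====
def pvMarkersB : List (List Char) :=
  ["<shreddit-post".toList, "<article".toList, "class=\"post".toList, "class=\"product".toList,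
   "class=\"item".toList, "data-testid=\"post".toList, "<main".toList]

-- the 'for i in range(len(low)): if any(low.startswith(m, i) …): break' loop of Source B
def pvScan : List Char → Nat → Option Nat
  | [], _ => none
  | c :: t, i =>
    if pvMarkersB.any (fun m => PySem.Chars.startswith (c :: t) m) then some i
    else pvScan t (i + 1)

def smart_sample_py_alt (html : String) (sample_size : Int) : String :=
  match pvScan (PySem.Str.lower html).toList 0 with
  | none => PySem.Str.slice html none (some sample_size)
  | some i =>
      let start : Int := max 0 ((i : Int) - 500)
      PySem.Str.slice html (some start) (some (start + sample_size))

-- ===== PRECONDITION & SPEC =====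
def Spec_smart_sample_py (html : String) (sample_size : Int) (out : String) : Prop := out = smart_sample_py_alt html sample_size
instance (html : String) (sample_size : Int) (out : String) : Decidable (Spec_smart_sample_py html sample_size out) := by unfold Spec_smart_sample_py; infer_instance

-- ===== CLAIM (what is proved, stated in full; the proofs are below) =====
def Claim_equal_smart_sample_py : Prop := ∀ (html : String) (sample_size : Int), Dom_smart_sample_py html sample_size → Spec_smart_sample_py html sample_size (smart_sample_py html sample_size)

-- ===== LEMMAS AND PROOFS =====

-- "some marker starts at the head of t"
def pvQ (t : List Char) : Prop := ∃ m ∈ pvMarkersB, m <+: t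

theorem pvMarkersB_ne_nil : ∀ m ∈ pvMarkersB, m ≠ [] := by decide

theorem pvQ_iff_any (s : List Char) :
    (pvMarkersB.any (fun m => PySem.Chars.startswith s m)) = true ↔ pvQ s := by
  simp [List.any_eq_true, pvQ, PySem.Chars.startswith_iff]

theorem pvQ_lt_length {s : List Char} {k : Nat} (h : pvQ (s.drop k)) : k < s.length := by
  obtain ⟨m, hm, hp⟩ := h
  by_contra hk
  rw [List.drop_eq_nil_of_le (by omega)] at hp
  exact pvMarkersB_ne_nil m hm (List.prefix_nil.mp hp)

theorem pvScan_some (s : List Char) : ∀ (i j : Nat), pvScan s i = some j →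
    i ≤ j ∧ pvQ (s.drop (j - i)) ∧ ∀ k < j - i, ¬ pvQ (s.drop k) := by
  induction s with
  | nil => intro i j h; simp [pvScan] at h
  | cons c t ih =>
    intro i j h
    by_cases hc : (pvMarkersB.any (fun m => PySem.Chars.startswith (c :: t) m)) = true
    · rw [pvScan, if_pos hc] at h
      injection h with h; subst h
      refine ⟨le_refl _, ?_, by omega⟩
      simpa using (pvQ_iff_any (c :: t)).mp hc
    · rw [pvScan, if_neg hc] at h
      obtain ⟨h1, h2, h3⟩ := ih (i + 1) j h
      refine ⟨by omega, ?_, ?_⟩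
      · have he : j - i = (j - (i + 1)) + 1 := by omega
        rw [he, List.drop_succ_cons]; exact h2
      · intro k hk
        cases k with
        | zero =>
          intro hq
          exact hc ((pvQ_iff_any (c :: t)).mpr (by simpa using hq))
        | succ k' =>
          rw [List.drop_succ_cons]
          exact h3 k' (by omega)

theorem pvScan_none (s : List Char) : ∀ (i : Nat), pvScan s i = none →
    ∀ k, ¬ pvQ (s.drop k) := by
  induction s with
  | nil =>
    intro i _ k hq
    exact absurd (pvQ_lt_length hq) (by simp)
  | cons c t ih =>
    intro i h k
    by_cases hc : (pvMarkersB.any (fun m => PySem.Chars.startswith (c :: t) m)) = true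
    · rw [pvScan, if_pos hc] at h; exact absurd h (by simp)
    · rw [pvScan, if_neg hc] at h
      cases k with
      | zero =>
        intro hq
        exact hc ((pvQ_iff_any (c :: t)).mpr (by simpa using hq))
      | succ k' =>
        rw [List.drop_succ_cons]
        exact ih (i + 1) h k'

-- A's running-min loop, on the list side
def pvFold (L : List Char) (M : List (List Char)) (e : Int) : Int :=
  M.foldl (fun earliest m =>
    if PySem.Chars.find L m ≠ -1 ∧ PySem.Chars.find L m < earliest
    then PySem.Chars.find L m else earliest) e

theorem pvFold_le (L : List Char) (M : List (List Char)) : ∀ e : Int, pvFold L M e ≤ e := by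
  induction M with
  | nil => intro e; simp [pvFold]
  | cons m0 M ih =>
    intro e
    rw [pvFold, List.foldl_cons]
    refine le_trans (ih _) ?_
    dsimp only
    split_ifs with h
    · exact le_of_lt h.2
    · exact le_refl e

theorem pvFold_cases (L : List Char) (M : List (List Char)) : ∀ e : Int,
    pvFold L M e = e ∨ ∃ m ∈ M, pvFold L M e = PySem.Chars.find L m ∧ PySem.Chars.find L m ≠ -1 := by
  induction M with
  | nil => intro e; left; simp [pvFold]
  | cons m0 M ih =>
    intro e
    rw [pvFold, List.foldl_cons]
    by_cases hc : PySem.Chars.find L m0 ≠ -1 ∧ PySem.Chars.find L m0 < e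
    · rw [if_pos hc]
      rcases ih (PySem.Chars.find L m0) with h | ⟨m, hm, h1, h2⟩
      · right; exact ⟨m0, by simp, h, hc.1⟩
      · right; exact ⟨m, List.mem_cons_of_mem _ hm, h1, h2⟩
    · rw [if_neg hc]
      rcases ih e with h | ⟨m, hm, h1, h2⟩
      · left; exact h
      · right; exact ⟨m, List.mem_cons_of_mem _ hm, h1, h2⟩

theorem pvFold_min (L : List Char) (M : List (List Char)) : ∀ e : Int, ∀ m ∈ M,
    PySem.Chars.find L m ≠ -1 → pvFold L M e ≤ PySem.Chars.find L m := by
  induction M with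
  | nil => intro e m hm; simp at hm
  | cons m0 M ih =>
    intro e m hm hf
    rw [pvFold, List.foldl_cons]
    rcases List.mem_cons.mp hm with rfl | hm'
    · split_ifs with hc
      · exact pvFold_le L M _
      · have he : e ≤ PySem.Chars.find L m := by
          by_contra hlt
          exact hc ⟨hf, by omega⟩
        exact le_trans (pvFold_le L M e) he
    · exact ih _ m hm' hf

theorem pvFold_eq_scan (L : List Char) :
    (match pvScan L 0 with
     | none => pvFold L pvMarkersB (L.length : Int) = (L.length : Int)
     | some j => pvFold L pvMarkersB (L.length : Int) = (j : Int) ∧ j < L.length) := by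
  cases hs : pvScan L 0 with
  | none =>
    have hnone := pvScan_none L 0 hs
    rcases pvFold_cases L pvMarkersB (L.length : Int) with h | ⟨m, hm, h1, h2⟩
    · exact h
    · exfalso
      have hinf : m <:+: L := by
        by_contra hni
        exact h2 ((PySem.Chars.find_eq_neg_one_iff L m).mpr hni)
      obtain ⟨j, hj⟩ := (PySem.Chars.exists_prefix_drop_iff_isIn m L).mpr
        ((PySem.Chars.isIn_iff_infix m L).mpr hinf)
      exact hnone j ⟨m, hm, hj⟩
  | some j =>
    obtain ⟨-, hq, hmin⟩ := pvScan_some L 0 j hs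
    simp only [Nat.sub_zero] at hq hmin
    have hjlen : j < L.length := pvQ_lt_length hq
    obtain ⟨m, hm, hp⟩ := hq
    have hfne : PySem.Chars.find L m ≠ -1 := by
      rw [Ne, PySem.Chars.find_eq_neg_one_iff, not_not]
      exact ((PySem.Chars.isIn_iff_infix m L).mp
        ((PySem.Chars.exists_prefix_drop_iff_isIn m L).mp ⟨j, hp⟩))
    have hf0 : 0 ≤ PySem.Chars.find L m := by
      have := PySem.Chars.neg_one_le_find L m; omega
    obtain ⟨hpre, hleast⟩ := PySem.Chars.find_spec hf0
    have hfle : PySem.Chars.find L m ≤ (j : Int) := by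
      by_contra hlt
      exact hleast j (by omega) hp
    have hub : pvFold L pvMarkersB (L.length : Int) ≤ (j : Int) :=
      le_trans (pvFold_min L pvMarkersB _ m hm hfne) hfle
    constructor
    · rcases pvFold_cases L pvMarkersB (L.length : Int) with h | ⟨m', hm', h1, h2⟩
      · omega
      · -- the fold landed on find L m'; that position satisfies pvQ, so j ≤ it
        have h0 : 0 ≤ PySem.Chars.find L m' := by
          have := PySem.Chars.neg_one_le_find L m'; omega
        obtain ⟨hpre', -⟩ := PySem.Chars.find_spec h0
        have hcq : pvQ (L.drop (PySem.Chars.find L m').toNat) := ⟨m', hm', hpre'⟩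
        have hge : ¬ ((PySem.Chars.find L m').toNat < j) := fun hlt => hmin _ hlt hcq
        omega
    · exact hjlen

theorem pvPortA_fold (html : String) (e : Int) :
    pvMarkersA.foldl (fun earliest marker =>
      let pos := PySem.Str.find (PySem.Str.lower html) (PySem.Str.lower marker)
      if pos ≠ -1 ∧ pos < earliest then pos else earliest) e
    = pvFold (PySem.Str.lower html).toList pvMarkersB e := by
  have hmap : pvMarkersB = pvMarkersA.map (fun m => (PySem.Str.lower m).toList) := by decide
  rw [pvFold, hmap, List.foldl_map]
  congr 1

-- ===== VERDICT (by name: the statement is the Claim_ definition above) =====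
theorem smart_sample_py_spec : Claim_equal_smart_sample_py := by
  intro html sample_size _
  unfold Spec_smart_sample_py smart_sample_py smart_sample_py_alt
  have hlen : ((PySem.Str.lower html).toList.length : Int) = PySem.Str.len html := by
    rw [PySem.Str.len_eq, PySem.Str.toList_lower]
    simp [PySem.Chars.lower]
  have hkey := pvFold_eq_scan (PySem.Str.lower html).toList
  rw [pvPortA_fold html (PySem.Str.len html), ← hlen]
  cases hs : pvScan (PySem.Str.lower html).toList 0 with
  | none =>
    rw [hs] at hkey
    simp only [hkey, lt_irrefl, if_false]
  | some j =>
    rw [hs] at hkey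
    obtain ⟨h1, h2⟩ := hkey
    rw [h1, if_pos (by exact_mod_cast h2)]
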